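-- pv_equiv track=rewrite | github.com/uysalserkan/dependency-visualizer | backend/app/core/graph/resolvers/go.py | _is_stdlib
-- ===== SOURCE A (Python) =====
-- GO_STDLIB_PACKAGES = {
--     # Core packages
--     "fmt", "errors", "io", "os", "path", "time", "sync", "context",
--     "strings", "bytes", "strconv", "math", "sort", "regexp", "encoding",
--
--     # Network & HTTP
--     "net", "net/http", "net/url", "net/rpc",
--
--     # Data formats
--     "encoding/json", "encoding/xml", "encoding/csv", "encoding/base64",
--     "encoding/hex", "encoding/gob", "encoding/binary",
--
--     # I/O & Files
--     "io/ioutil", "io/fs", "os/exec", "os/signal", "os/user",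
--     "path/filepath", "bufio",
--
--     # Crypto & Security
--     "crypto", "crypto/md5", "crypto/sha1", "crypto/sha256", "crypto/sha512",
--     "crypto/rand", "crypto/tls", "crypto/x509",
--
--     # Testing & Debugging
--     "testing", "testing/quick", "runtime", "runtime/debug", "log",
--
--     # Reflection & Types
--     "reflect", "unsafe",
--
--     # Concurrency
--     "sync/atomic",
--
--     # Compression
--     "compress/gzip", "compress/zlib", "archive/tar", "archive/zip",
--
--     # Templates
--     "text/template", "html/template",
--
--     # Database
--     "database/sql", "database/sql/driver",
--
--     # Image
--     "image", "image/color", "image/png", "image/jpeg", "image/gif",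
--
--     # Misc
--     "flag", "container/list", "container/heap", "container/ring",
--     "html", "mime", "plugin", "unicode",
-- }
--
-- def _is_stdlib(import_path: str) -> bool:
--     """Check if import is from Go standard library.
--
--     Args:
--         import_path: Import path to check
--
--     Returns:
--         True if stdlib package
--     """
--     # Check exact match
--     if import_path in GO_STDLIB_PACKAGES:
--         return True
--
--     # Check if it's a sub-package of stdlib (e.g. net/http/httputil)
--     parts = import_path.split("/")
--     for i in range(1, len(parts) + 1):
--         potential_pkg = "/".join(parts[:i])
--         if potential_pkg in GO_STDLIB_PACKAGES:
--             return True
--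
--     # Stdlib packages don't have dots in first component (heuristic)
--     # Third-party: github.com/user/repo, golang.org/x/tools
--     # Stdlib: fmt, net/http, encoding/json
--     first_component = parts[0]
--     return "." not in first_component
-- ===== SOURCE B (Python) =====
-- def _is_stdlib(import_path: str) -> bool:
--     # Stdlib import paths are exactly those whose first path component has no
--     # dot: every GO_STDLIB_PACKAGES entry is dot-free in its first component,
--     # so the table lookups only ever succeed when the final heuristic would
--     # return True anyway.  One left-to-right character scan decides it.
--     for ch in import_path:
--         if ch == "/":
--             return True
--         if ch == ".":
--             return False
--     return True
-- ===== Notes on version B (the rewrite author's own statement) =====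
-- stated objective: simpler
-- what changed: B drops the GO_STDLIB_PACKAGES table, the split and the prefix-join membership loop entirely and decides the result with a single left-to-right character scan ('/' before any '.' or no '.' at all in the first component means stdlib), which is valid because every table entry is dot-free in its first path component, so the table branches can only return True when the final heuristic already does.
import Mathlib
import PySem

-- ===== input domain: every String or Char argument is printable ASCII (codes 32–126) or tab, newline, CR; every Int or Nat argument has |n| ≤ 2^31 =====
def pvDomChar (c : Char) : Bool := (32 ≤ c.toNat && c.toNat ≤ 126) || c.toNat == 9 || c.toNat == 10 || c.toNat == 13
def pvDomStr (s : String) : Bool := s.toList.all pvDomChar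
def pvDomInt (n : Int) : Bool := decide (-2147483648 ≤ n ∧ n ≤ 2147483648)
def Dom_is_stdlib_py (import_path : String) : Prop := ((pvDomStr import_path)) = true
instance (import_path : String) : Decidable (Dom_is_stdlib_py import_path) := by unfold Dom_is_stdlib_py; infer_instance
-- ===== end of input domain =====

-- B replaces the stdlib table lookup and the prefix-join loop by a single character
-- scan (every table entry is dot-free in its first path component, so A's final
-- heuristic already decides the answer); objective: simpler.

-- ===== PORT A =====
def GO_STDLIB_PACKAGES_pv : PySem.Set String := PySem.Set.ofList
  ["fmt", "errors", "io", "os", "path", "time", "sync", "context",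
   "strings", "bytes", "strconv", "math", "sort", "regexp", "encoding",
   "net", "net/http", "net/url", "net/rpc",
   "encoding/json", "encoding/xml", "encoding/csv", "encoding/base64",
   "encoding/hex", "encoding/gob", "encoding/binary",
   "io/ioutil", "io/fs", "os/exec", "os/signal", "os/user",
   "path/filepath", "bufio",
   "crypto", "crypto/md5", "crypto/sha1", "crypto/sha256", "crypto/sha512",
   "crypto/rand", "crypto/tls", "crypto/x509",
   "testing", "testing/quick", "runtime", "runtime/debug", "log",
   "reflect", "unsafe",
   "sync/atomic",
   "compress/gzip", "compress/zlib", "archive/tar", "archive/zip",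
   "text/template", "html/template",
   "database/sql", "database/sql/driver",
   "image", "image/color", "image/png", "image/jpeg", "image/gif",
   "flag", "container/list", "container/heap", "container/ring",
   "html", "mime", "plugin", "unicode"]

def is_stdlib_py (import_path : String) : Bool :=
  -- if import_path in GO_STDLIB_PACKAGES: return True
  if PySem.Set.contains GO_STDLIB_PACKAGES_pv import_path then true
  else
    -- parts = import_path.split("/")
    let parts := PySem.Chars.splitOn import_path.toList ['/']
    -- for i in range(1, len(parts) + 1): if "/".join(parts[:i]) in …: return True
    if (PySem.List.pyRange 1 ((parts.length : Int) + 1) 1).any (fun i =>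
        PySem.Set.contains GO_STDLIB_PACKAGES_pv
          (String.ofList (PySem.Chars.join ['/'] (PySem.List.slice parts none (some i)))))
    then true
    else
      -- first_component = parts[0]; str.split never returns an empty list, so
      -- pyGet? is always `some` here and the `.getD []` default is unreachable
      -- return "." not in first_component
      !(PySem.Chars.isIn ['.'] ((PySem.List.pyGet? parts 0).getD []))

-- ===== PORT B =====
-- for ch in import_path: '/' → return True, '.' → return False; loop ends → True
def altScan : List Char → Bool
  | [] => true
  | c :: rest => if c = '/' then true else if c = '.' then false else altScan rest

def is_stdlib_py_alt (import_path : String) : Bool := altScan import_path.toList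

-- ===== PRECONDITION & SPEC =====
def Spec_is_stdlib_py (import_path : String) (out : Bool) : Prop := out = is_stdlib_py_alt import_path
instance (import_path : String) (out : Bool) : Decidable (Spec_is_stdlib_py import_path out) := by unfold Spec_is_stdlib_py; infer_instance

-- ===== CLAIM (what is proved, stated in full; the proofs are below) =====
def Claim_equal_is_stdlib_py : Prop := ∀ (import_path : String), Dom_is_stdlib_py import_path → Spec_is_stdlib_py import_path (is_stdlib_py import_path)

-- ===== LEMMAS AND PROOFS =====

-- B's scan returns true iff no '.' occurs before the first '/'
lemma altScan_iff (l : List Char) : altScan l = true ↔ '.' ∉ l.takeWhile (· ≠ '/') := by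
  induction l with
  | nil => simp [altScan]
  | cons c rest ih =>
    by_cases hs : c = '/'
    · subst hs; simp [altScan]
    · by_cases hd : c = '.'
      · subst hd; simp [altScan]
      · simp [altScan, hs, hd, ih]
        exact fun _ h => hd h.symm

-- splitOn.go: the accumulator only contributes a reversed prefix
lemma go_acc (sep : List Char) (fuel : Nat) :
    ∀ (l cur : List Char) (acc : List (List Char)),
      PySem.Chars.splitOn.go sep fuel l cur acc
        = acc.reverse ++ PySem.Chars.splitOn.go sep fuel l cur [] := by
  induction fuel with
  | zero => intro l cur acc; simp [PySem.Chars.splitOn.go]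
  | succ f ih =>
    intro l cur acc
    cases l with
    | nil => simp [PySem.Chars.splitOn.go]
    | cons c rest =>
      rw [PySem.Chars.splitOn.go, PySem.Chars.splitOn.go]
      by_cases h : sep.isPrefixOf (c :: rest)
      · simp only [h, if_true]
        rw [ih _ [] (cur.reverse :: acc), ih _ [] [cur.reverse]]
        simp
      · simp only [h, Bool.false_eq_true, if_false]
        exact ih rest (c :: cur) acc

-- splitOn.go never returns []
lemma go_ne_nil (sep : List Char) (fuel : Nat) :
    ∀ (l cur : List Char) (acc : List (List Char)),
      PySem.Chars.splitOn.go sep fuel l cur acc ≠ [] := by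
  induction fuel with
  | zero => intro l cur acc; simp [PySem.Chars.splitOn.go]
  | succ f ih =>
    intro l cur acc
    cases l with
    | nil => simp [PySem.Chars.splitOn.go]
    | cons c rest =>
      rw [PySem.Chars.splitOn.go]
      by_cases h : sep.isPrefixOf (c :: rest)
      · simp only [h, if_true]; exact ih _ _ _
      · simp only [h, Bool.false_eq_true, if_false]; exact ih _ _ _

-- head of the split (with enough fuel): the chars before the first '/'
lemma go_headI (fuel : Nat) :
    ∀ (l cur : List Char), l.length ≤ fuel →
      (PySem.Chars.splitOn.go ['/'] fuel l cur []).headI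
        = cur.reverse ++ l.takeWhile (· ≠ '/') := by
  induction fuel with
  | zero =>
    intro l cur h
    have hl : l = [] := by cases l <;> simp_all
    subst hl; simp [PySem.Chars.splitOn.go]
  | succ f ih =>
    intro l cur h
    cases l with
    | nil => simp [PySem.Chars.splitOn.go]
    | cons c rest =>
      rw [PySem.Chars.splitOn.go]
      by_cases hc : c = '/'
      · subst hc
        simp only [List.isPrefixOf, BEq.rfl, Bool.true_and, if_true]
        rw [go_acc]
        simp
      · have hpre : (['/'] : List Char).isPrefixOf (c :: rest) = false := by
          simp [List.isPrefixOf]; exact fun h' => absurd h'.symm hc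
        simp only [hpre, Bool.false_eq_true, if_false]
        rw [ih rest (c :: cur) (by simpa using Nat.lt_succ_iff.mp (by simpa using h))]
        simp [hc]

-- no piece of the split contains '/'
lemma go_no_slash (fuel : Nat) :
    ∀ (l cur : List Char) (acc : List (List Char)), l.length ≤ fuel →
      (∀ p ∈ acc, '/' ∉ p) → '/' ∉ cur →
      ∀ p ∈ PySem.Chars.splitOn.go ['/'] fuel l cur acc, '/' ∉ p := by
  induction fuel with
  | zero =>
    intro l cur acc h hacc hcur
    have hl : l = [] := by cases l <;> simp_all
    subst hl
    simp only [PySem.Chars.splitOn.go]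
    intro p hp
    simp only [List.mem_reverse, List.mem_cons] at hp
    rcases hp with hp | hp
    · subst hp; simpa using hcur
    · exact hacc p hp
  | succ f ih =>
    intro l cur acc h hacc hcur
    cases l with
    | nil =>
      simp only [PySem.Chars.splitOn.go]
      intro p hp
      simp only [List.mem_reverse, List.mem_cons] at hp
      rcases hp with hp | hp
      · subst hp; simpa using hcur
      · exact hacc p hp
    | cons c rest =>
      rw [PySem.Chars.splitOn.go]
      by_cases hc : c = '/'
      · subst hc
        simp only [List.isPrefixOf, BEq.rfl, Bool.true_and, if_true]
        refine ih _ [] _ (by simpa using Nat.lt_succ_iff.mp (by simpa using h)) ?_ (by simp)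
        intro p hp
        rcases List.mem_cons.mp hp with hp | hp
        · subst hp; simpa using hcur
        · exact hacc p hp
      · have hpre : (['/'] : List Char).isPrefixOf (c :: rest) = false := by
          simp [List.isPrefixOf]; exact fun h' => absurd h'.symm hc
        simp only [hpre, Bool.false_eq_true, if_false]
        refine ih rest (c :: cur) acc (by simpa using Nat.lt_succ_iff.mp (by simpa using h)) hacc ?_
        intro hmem
        rcases List.mem_cons.mp hmem with hp | hp
        · exact hc hp.symm
        · exact hcur hp

lemma splitOn_ne_nil (l : List Char) : PySem.Chars.splitOn l ['/'] ≠ [] := by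
  simpa [PySem.Chars.splitOn] using go_ne_nil ['/'] (l.length + 1) l [] []

lemma splitOn_headI (l : List Char) :
    (PySem.Chars.splitOn l ['/']).headI = l.takeWhile (· ≠ '/') := by
  simpa [PySem.Chars.splitOn] using go_headI (l.length + 1) l [] (by omega)

lemma splitOn_no_slash (l : List Char) :
    ∀ p ∈ PySem.Chars.splitOn l ['/'], '/' ∉ p := by
  simpa [PySem.Chars.splitOn] using
    go_no_slash (l.length + 1) l [] [] (by omega) (by simp) (by simp)

lemma takeWhile_of_no_slash (p : List Char) (hp : '/' ∉ p) :
    p.takeWhile (· ≠ '/') = p := by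
  rw [List.takeWhile_eq_self_iff]
  intro a ha
  simp only [decide_eq_true_eq]
  exact fun h => hp (h ▸ ha)

lemma takeWhile_append_slash (p l' : List Char) (hp : '/' ∉ p) :
    (p ++ '/' :: l').takeWhile (· ≠ '/') = p := by
  induction p with
  | nil => simp
  | cons a p' ih =>
    have ha : a ≠ '/' := fun h => hp (by simp [h])
    have ih' := ih (fun h => hp (List.mem_cons_of_mem _ h))
    simp [ha]
    simpa using ih'

-- first component of a '/'-join, when the first piece is slash-free
lemma join_takeWhile (p : List Char) (ps : List (List Char)) (hp : '/' ∉ p) :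
    (PySem.Chars.join ['/'] (p :: ps)).takeWhile (· ≠ '/') = p := by
  cases ps with
  | nil => rw [PySem.Chars.join_singleton]; exact takeWhile_of_no_slash p hp
  | cons q ps' =>
    rw [PySem.Chars.join_cons_cons]
    have : p ++ ['/'] ++ PySem.Chars.join ['/'] (q :: ps')
        = p ++ '/' :: PySem.Chars.join ['/'] (q :: ps') := by simp
    rw [this, takeWhile_append_slash p _ hp]

-- every table entry is dot-free in its first path component
set_option maxRecDepth 40000 in
lemma table_no_dot :
    ∀ t ∈ GO_STDLIB_PACKAGES_pv, '.' ∉ t.toList.takeWhile (· ≠ '/') := by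
  decide

-- ===== VERDICT (by name: the statement is the Claim_ definition above) =====
theorem is_stdlib_py_spec : Claim_equal_is_stdlib_py := by
  intro s _
  unfold Spec_is_stdlib_py is_stdlib_py is_stdlib_py_alt
  simp only []
  set parts := PySem.Chars.splitOn s.toList ['/'] with hparts
  obtain ⟨p, ps, hpps⟩ : ∃ p ps, parts = p :: ps := by
    cases hp : parts with
    | nil => exact absurd hp (splitOn_ne_nil s.toList)
    | cons a b => exact ⟨a, b, rfl⟩
  have hhead : p = s.toList.takeWhile (· ≠ '/') := by
    have h := splitOn_headI s.toList
    rw [← hparts, hpps] at h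
    simpa using h
  have hslash : '/' ∉ p :=
    splitOn_no_slash s.toList p (by show p ∈ parts; rw [hpps]; exact List.mem_cons_self)
  split_ifs with h1 h2
  · -- exact table hit
    have hmem : s ∈ GO_STDLIB_PACKAGES_pv := (PySem.Set.contains_iff _ _).mp h1
    exact ((altScan_iff s.toList).mpr (table_no_dot s hmem)).symm
  · -- prefix-join loop hit
    obtain ⟨i, hi, hc⟩ := List.any_eq_true.mp h2
    have hrange := PySem.List.mem_pyRange_one.mp hi
    rw [PySem.List.slice_to parts (show (0:Int) ≤ i by omega)] at hc
    obtain ⟨k, hk⟩ : ∃ k, i.toNat = k + 1 := ⟨i.toNat - 1, by omega⟩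
    rw [hpps, hk, List.take_succ_cons] at hc
    have hmem := (PySem.Set.contains_iff _ _).mp hc
    have hnd := table_no_dot _ hmem
    simp only [String.toList_ofList] at hnd
    rw [join_takeWhile p _ hslash] at hnd
    exact ((altScan_iff s.toList).mpr (hhead ▸ hnd)).symm
  · -- final heuristic: both sides test '.' in the first component
    rw [hpps]
    simp only [PySem.List.pyGet?_zero_cons, Option.getD_some]
    by_cases hd : '.' ∈ p
    · have hin : PySem.Chars.isIn ['.'] p = true :=
        (PySem.Chars.isIn_iff_infix _ _).mpr ((List.singleton_infix_iff _ _).mpr hd)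
      have halt : altScan s.toList = false := by
        rcases Bool.eq_false_or_eq_true (altScan s.toList) with h | h
        · exact absurd (hhead ▸ (altScan_iff s.toList).mp h) (fun hn => hn hd)
        · exact h
      rw [hin, halt]; rfl
    · have hin : PySem.Chars.isIn ['.'] p = false := by
        rcases Bool.eq_false_or_eq_true (PySem.Chars.isIn ['.'] p) with h | h
        · exact absurd ((List.singleton_infix_iff _ _).mp
            ((PySem.Chars.isIn_iff_infix _ _).mp h)) hd
        · exact h
      have halt : altScan s.toList = true :=
        (altScan_iff s.toList).mpr (by rw [← hhead]; exact hd)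
      rw [hin, halt]; rfl
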